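-- pv_equiv track=rewrite | github.com/ningshixian/keras_bc6_track1 | sample/utils/helpers.py | convert_2_BIO
-- ===== SOURCE A (Python) =====
-- def convert_2_BIO(label):
--     """ Convert inplace IOBES encoding to BIO encoding """
--     tag = []
--     i = 0
--     while i < len(label):
--         char = label[i]
--         i += 1
--         if char == 'S':
--             tag.append('B')
--         elif char == 'E':
--             tag.append('I')
--         elif char == 'I':
--             tag.append('I')
--             if i < len(label) and label[i] == 'B':
--                 tag.append('I')
--                 i = i + 1
--         else:
--             tag.append(char)
--     return tag
-- ===== SOURCE B (Python) =====
-- def convert_2_BIO(label):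
--     """ Convert IOBES encoding to BIO encoding: single fixed-stride pass with a look-back """
--     tag = []
--     prev = None
--     for char in label:
--         if char == 'S':
--             tag.append('B')
--         elif char == 'E' or char == 'I':
--             tag.append('I')
--         elif char == 'B':
--             tag.append('I' if prev == 'I' else 'B')
--         else:
--             tag.append(char)
--         prev = char
--     return tag
-- ===== Notes on version B (the rewrite author's own statement) =====
-- stated objective: simpler
-- what changed: Replaces the while-loop with manual index and lookahead-and-consume (an 'I' peeks at the next element and skips a following 'B') by a fixed-stride for-loop that looks back at the previous element: 'B' becomes 'I' exactly when the previous label is 'I'.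
import Mathlib
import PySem

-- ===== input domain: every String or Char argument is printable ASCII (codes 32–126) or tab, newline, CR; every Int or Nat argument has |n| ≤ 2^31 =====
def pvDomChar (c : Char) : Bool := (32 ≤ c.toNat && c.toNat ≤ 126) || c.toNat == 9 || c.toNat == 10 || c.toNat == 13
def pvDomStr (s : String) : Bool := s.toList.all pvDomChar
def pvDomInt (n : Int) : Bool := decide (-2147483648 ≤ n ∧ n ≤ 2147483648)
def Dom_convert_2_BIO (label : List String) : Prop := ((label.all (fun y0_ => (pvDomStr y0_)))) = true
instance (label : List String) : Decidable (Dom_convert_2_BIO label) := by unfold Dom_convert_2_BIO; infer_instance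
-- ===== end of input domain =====

-- B replaces A's while-loop with manual index and lookahead-and-consume by a fixed-stride
-- forward pass whose 'B' case looks back at the previous element (objective: simpler).

-- ===== PORT A =====
-- A's while loop over index i: each step consumes label[i] (and, in the 'I' branch,
-- possibly also a following 'B'); rendered as the corresponding recursion on the list.
def convert_2_BIO : List String → List String
  | [] => []
  | "S" :: rest => "B" :: convert_2_BIO rest
  | "E" :: rest => "I" :: convert_2_BIO rest
  | "I" :: "B" :: rest' => "I" :: "I" :: convert_2_BIO rest'
  | "I" :: rest => "I" :: convert_2_BIO rest
  | ch :: rest => ch :: convert_2_BIO rest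

-- ===== PORT B =====
-- one element emitted per step of Source B's for loop; state = (tag so far, previous label)
def convert_2_BIO_alt (label : List String) : List String :=
  (label.foldl
    (fun (s : List String × Option String) ch =>
      (s.1 ++ [if ch = "S" then "B"
               else if ch = "E" ∨ ch = "I" then "I"
               else if ch = "B" then (if s.2 = some "I" then "I" else "B")
               else ch],
       some ch))
    ([], none)).1

-- ===== PRECONDITION & SPEC =====
def Spec_convert_2_BIO (label : List String) (out : List String) : Prop := out = convert_2_BIO_alt label
instance (label : List String) (out : List String) : Decidable (Spec_convert_2_BIO label out) := by unfold Spec_convert_2_BIO; infer_instance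

-- ===== CLAIM (what is proved, stated in full; the proofs are below) =====
def Claim_equal_convert_2_BIO : Prop := ∀ (label : List String), Dom_convert_2_BIO label → Spec_convert_2_BIO label (convert_2_BIO label)

-- ===== LEMMAS AND PROOFS =====

-- B's loop body as a pure function of (previous label, current label)
def bOut (prev : Option String) (ch : String) : String :=
  if ch = "S" then "B"
  else if ch = "E" ∨ ch = "I" then "I"
  else if ch = "B" then (if prev = some "I" then "I" else "B")
  else ch

-- B's loop, with the accumulator factored out
def bRun (prev : Option String) : List String → List String
  | [] => []
  | ch :: rest => bOut prev ch :: bRun (some ch) rest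

theorem foldl_eq_bRun (label : List String) (tag : List String) (prev : Option String) :
    (label.foldl
      (fun (s : List String × Option String) ch =>
        (s.1 ++ [if ch = "S" then "B"
                 else if ch = "E" ∨ ch = "I" then "I"
                 else if ch = "B" then (if s.2 = some "I" then "I" else "B")
                 else ch],
         some ch))
      (tag, prev)).1 = tag ++ bRun prev label := by
  induction label generalizing tag prev with
  | nil => simp [bRun]
  | cons ch rest ih =>
    simp only [List.foldl_cons, bRun, ih, bOut, List.append_assoc, List.singleton_append]

theorem convA_eq_bRun (label : List String) (prev : Option String)
    (h : prev = some "I" → label.head? ≠ some "B") :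
    convert_2_BIO label = bRun prev label := by
  fun_induction convert_2_BIO label generalizing prev with
  | case1 => rfl
  | case2 rest ih => simp [bRun, bOut, ih (some "S") (by simp)]
  | case3 rest ih => simp [bRun, bOut, ih (some "E") (by simp)]
  | case4 rest' ih => simp [bRun, bOut, ih (some "B") (by simp)]
  | case5 rest hne ih =>
    have hh : (some "I" : Option String) = some "I" → rest.head? ≠ some "B" := by
      intro _ hB
      cases rest with
      | nil => simp at hB
      | cons y ys =>
        simp only [List.head?_cons, Option.some.injEq] at hB
        exact hne ys (by rw [hB])
    simp [bRun, bOut, ih (some "I") hh]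
  | case6 ch rest hS hE hIB hI ih =>
    have ih' := ih (some ch) (by intro hc; exact absurd (Option.some.inj hc) (fun e => hI e))
    simp only [bRun]
    rw [← ih']
    have hout : bOut prev ch = ch := by
      by_cases hB : ch = "B"
      · have hpI : prev ≠ some "I" := fun hp => (h hp) (by simp [hB])
        subst hB
        simp [bOut, hpI]
      · have hS' : ch ≠ "S" := fun e => hS e
        have hE' : ch ≠ "E" := fun e => hE e
        have hI' : ch ≠ "I" := fun e => hI e
        simp [bOut, hS', hE', hI', hB]
    rw [hout]

-- ===== VERDICT (by name: the statement is the Claim_ definition above) =====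
theorem convert_2_BIO_spec : Claim_equal_convert_2_BIO := by
  intro label _
  unfold Spec_convert_2_BIO convert_2_BIO_alt
  rw [foldl_eq_bRun, List.nil_append]
  exact convA_eq_bRun label none (by simp)
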